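-- pv_equiv track=rewrite | github.com/pypi-data/pypi-mirror-354 | packages/magicwandmondub/magicwandmondub-0.1.0-py3-none-any.whl/magicwandmondub/speech_streamer.py | process_streaming_responses
-- ===== SOURCE A (Python) =====
-- def process_streaming_responses(responses):
--     """
--     Filters duplicate text from a list of streaming API responses
--     and forms a complete sentence.
--
--     Args:
--         responses (list of str): A list of text responses from the speech-to-text API.
--
--     Returns:
--         str: A complete and filtered sentence.
--     """
--     final_sentence = ""
--     for response in responses:
--         # Check if the new response starts with the already formed sentence.
--         # The 'strip()' is used to handle potential leading/trailing whitespace.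
--         if response.strip().startswith(final_sentence.strip()):
--             # Find the new, unique part of the response.
--             new_part = response.strip()[len(final_sentence.strip()):]
--             # Append the new part to the final sentence.
--             final_sentence += new_part
--         else:
--             # This handles cases where a new sentence starts without overlap.
--             final_sentence = response.strip()
--
--     return final_sentence.strip()
-- ===== SOURCE B (Python) =====
-- def process_streaming_responses(responses):
--     # Both branches of the original overlap-merge leave the sentence equal to
--     # response.strip(), so just keep the last stripped response.
--     result = ""
--     for response in responses:
--         result = response.strip()
--     return result
-- ===== Notes on version B (the rewrite author's own statement) =====
-- stated objective: simpler
-- what changed: B observes that both branches of A's overlap-merge leave the accumulated sentence equal to response.strip(), so it drops the startswith test, the slicing and the final re-strip and simply keeps the last stripped response.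
import Mathlib
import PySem

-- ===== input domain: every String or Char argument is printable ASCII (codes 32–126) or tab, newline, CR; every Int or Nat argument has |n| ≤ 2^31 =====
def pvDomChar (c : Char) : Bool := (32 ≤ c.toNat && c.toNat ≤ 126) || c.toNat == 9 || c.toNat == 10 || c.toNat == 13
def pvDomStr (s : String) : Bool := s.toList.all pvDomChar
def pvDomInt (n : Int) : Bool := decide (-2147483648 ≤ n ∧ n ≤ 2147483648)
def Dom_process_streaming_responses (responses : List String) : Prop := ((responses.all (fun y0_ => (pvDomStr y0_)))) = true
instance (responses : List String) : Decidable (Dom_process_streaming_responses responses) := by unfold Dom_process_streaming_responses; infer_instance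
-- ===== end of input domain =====

-- B drops A's startswith/slice overlap-merge (whose two branches both yield response.strip()) and just keeps the last stripped response: simpler, same values.


-- ===== PORT A =====
def process_streaming_responses (responses : List String) : String :=
  let final_sentence :=
    responses.foldl (fun final_sentence response =>
      if PySem.Str.startswith (PySem.Str.strip response) (PySem.Str.strip final_sentence) then
        let new_part := PySem.Str.slice (PySem.Str.strip response)
          (some (PySem.Str.len (PySem.Str.strip final_sentence))) none
        final_sentence ++ new_part
      else
        PySem.Str.strip response) ""
  PySem.Str.strip final_sentence

-- ===== PORT B =====
def process_streaming_responses_alt (responses : List String) : String :=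
  responses.foldl (fun _ response => PySem.Str.strip response) ""

-- ===== PRECONDITION & SPEC =====
def Spec_process_streaming_responses (responses : List String) (out : String) : Prop := out = process_streaming_responses_alt responses
instance (responses : List String) (out : String) : Decidable (Spec_process_streaming_responses responses out) := by unfold Spec_process_streaming_responses; infer_instance

-- ===== CLAIM (what is proved, stated in full; the proofs are below) =====
def Claim_equal_process_streaming_responses : Prop := ∀ (responses : List String), Dom_process_streaming_responses responses → Spec_process_streaming_responses responses (process_streaming_responses responses)

-- ===== LEMMAS AND PROOFS =====

-- the first element surviving dropWhile fails the predicate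
theorem pv_dropWhile_getElem_zero (p : Char → Bool) (l : List Char)
    (hl : 0 < (l.dropWhile p).length) : p (l.dropWhile p)[0] = false := by
  have h := List.head?_dropWhile_not p l
  rw [List.head?_eq_getElem?, List.getElem?_eq_getElem hl] at h
  exact h

-- strip is idempotent (List Char level)
theorem pv_chars_strip_idem (cs : List Char) :
    PySem.Chars.strip (PySem.Chars.strip cs) = PySem.Chars.strip cs := by
  unfold PySem.Chars.strip PySem.Chars.lstrip PySem.Chars.rstrip
  set p := PySem.Chars.isspace with hp
  set a := cs.dropWhile p with ha
  set d := a.reverse.dropWhile p with hd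
  have hda : d <:+ a.reverse := by rw [hd]; exact List.dropWhile_suffix p
  have hba : d.reverse <+: a := by
    rw [← a.reverse_reverse]
    exact List.reverse_prefix.mpr (by simpa using hda)
  have hlb : d.reverse.dropWhile p = d.reverse := by
    rw [List.dropWhile_eq_self_iff]
    intro hl hph
    have hlen : 0 < a.length := lt_of_lt_of_le hl hba.length_le
    have hg : d.reverse[0] = a[0] := hba.getElem hl
    have hz : p a[0] = false := pv_dropWhile_getElem_zero p cs hlen
    rw [hg, hz] at hph
    cases hph
  have hrb : d.dropWhile p = d := by
    rw [hd, List.dropWhile_eq_self_iff]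
    intro hl hph
    have := pv_dropWhile_getElem_zero p a.reverse hl
    simp [this] at hph
  rw [hlb, List.reverse_reverse, hrb]

-- strip is idempotent (String level)
theorem pv_str_strip_idem (s : String) :
    PySem.Str.strip (PySem.Str.strip s) = PySem.Str.strip s := by
  apply String.toList_injective
  simp [pv_chars_strip_idem]

-- on a stripped accumulator, A's loop body reduces to B's (both branches give strip response)
theorem pv_stepA_eq (fs r : String) (hfs : PySem.Str.strip fs = fs) :
    (if PySem.Str.startswith (PySem.Str.strip r) (PySem.Str.strip fs) then
        let new_part := PySem.Str.slice (PySem.Str.strip r)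
          (some (PySem.Str.len (PySem.Str.strip fs))) none
        fs ++ new_part
      else PySem.Str.strip r) = PySem.Str.strip r := by
  rw [hfs]
  split_ifs with h
  · apply String.toList_injective
    have hpre : fs.toList <+: (PySem.Str.strip r).toList :=
      (PySem.Chars.startswith_iff _ _).mp (by simpa using h)
    have hlen : PySem.Str.len fs = ((fs.toList.length : Nat) : Int) := by
      simp [PySem.Str.len]
    rw [hlen]
    simp only [String.toList_append, PySem.Str.toList_slice,
      PySem.Chars.slice_eq_listSlice, PySem.List.slice_from_natCast]
    obtain ⟨t, ht⟩ := hpre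
    rw [← ht]
    simp
  · rfl

-- loop invariant: starting from a stripped accumulator, A's fold equals B's and stays stripped
theorem pv_fold_eq (l : List String) :
    ∀ s : String, PySem.Str.strip s = s →
      (l.foldl (fun final_sentence response =>
        if PySem.Str.startswith (PySem.Str.strip response) (PySem.Str.strip final_sentence) then
          let new_part := PySem.Str.slice (PySem.Str.strip response)
            (some (PySem.Str.len (PySem.Str.strip final_sentence))) none
          final_sentence ++ new_part
        else
          PySem.Str.strip response) s
      = l.foldl (fun _ response => PySem.Str.strip response) s)
      ∧ PySem.Str.strip (l.foldl (fun _ response => PySem.Str.strip response) s)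
        = l.foldl (fun _ response => PySem.Str.strip response) s := by
  induction l with
  | nil => intro s hs; exact ⟨by simp, hs⟩
  | cons r t ih =>
    intro s hs
    have hstep := pv_stepA_eq s r hs
    have hrest := ih (PySem.Str.strip r) (pv_str_strip_idem r)
    refine ⟨?_, hrest.2⟩
    simp only [List.foldl_cons]
    rw [hstep]
    exact hrest.1

theorem pv_strip_empty : PySem.Str.strip "" = "" := by decide

-- ===== VERDICT (by name: the statement is the Claim_ definition above) =====
theorem process_streaming_responses_spec : Claim_equal_process_streaming_responses := by
  intro responses _
  unfold Spec_process_streaming_responses process_streaming_responses process_streaming_responses_alt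
  have h := pv_fold_eq responses "" pv_strip_empty
  rw [h.1, h.2]
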